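-- pv_equiv track=rewrite | github.com/kamangir/bluer-objects | bluer_objects/README/process/legacy.py | apply_legacy_on_line
-- ===== SOURCE A (Python) =====
-- def apply_legacy_on_line(line: str) -> str:
--     for before, after in {
--         "yaml:::": "metadata:::",
--         "--help--": "help:::",
--         "--include": "include:::",
--         "--table--": "items:::",
--         "--signature--": "signature:::",
--     }.items():
--         line = line.replace(before, after)
--     return line
-- ===== SOURCE B (Python) =====
-- _LEGACY = (
--     ("yaml:::", "metadata:::"),
--     ("--help--", "help:::"),
--     ("--include", "include:::"),
--     ("--table--", "items:::"),
--     ("--signature--", "signature:::"),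
-- )
--
--
-- def apply_legacy_on_line(line: str) -> str:
--     def go(s, pairs):
--         if not pairs:
--             return s
--         before, after = pairs[0]
--         return go(after.join(s.split(before)), pairs[1:])
--
--     return go(line, _LEGACY)
-- ===== Notes on version B (the rewrite author's own statement) =====
-- stated objective: alternative
-- what changed: B applies each marker rewrite by splitting the line on the marker and joining the pieces with the replacement, recursing over a tuple of (marker, replacement) pairs, instead of A's dict-iteration loop of sequential str.replace calls.
import Mathlib
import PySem

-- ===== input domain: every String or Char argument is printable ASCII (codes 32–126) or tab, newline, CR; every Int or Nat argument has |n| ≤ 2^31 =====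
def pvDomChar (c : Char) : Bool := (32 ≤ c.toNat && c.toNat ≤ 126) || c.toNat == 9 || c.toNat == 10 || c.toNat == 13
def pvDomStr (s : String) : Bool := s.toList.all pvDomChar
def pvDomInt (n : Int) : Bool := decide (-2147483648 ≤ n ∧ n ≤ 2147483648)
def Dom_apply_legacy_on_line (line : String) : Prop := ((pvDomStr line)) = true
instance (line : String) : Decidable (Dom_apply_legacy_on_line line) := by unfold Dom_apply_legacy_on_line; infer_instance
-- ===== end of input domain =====

-- B replaces A's loop of sequential str.replace passes by a recursion over the pair
-- list that rewrites each marker via split-on-marker + join-with-replacement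
-- (objective: alternative decomposition, same exact return value).

-- ===== PORT A =====
-- the dict literal has distinct keys, so .items() iterates exactly this list in insertion order
def legacyItems : List (String × String) :=
  [("yaml:::", "metadata:::"), ("--help--", "help:::"), ("--include", "include:::"),
   ("--table--", "items:::"), ("--signature--", "signature:::")]

def apply_legacy_on_line (line : String) : String :=
  legacyItems.foldl (fun l p => PySem.Str.replace l p.1 p.2) line

-- ===== PORT B =====
def legacyPairsB : List (String × String) :=
  [("yaml:::", "metadata:::"), ("--help--", "help:::"), ("--include", "include:::"),
   ("--table--", "items:::"), ("--signature--", "signature:::")]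

-- s.split(before): every marker literal is nonempty, so Chars.splitOn is exact here
def applyLegacyGo (s : String) (pairs : List (String × String)) : String :=
  match pairs with
  | [] => s
  | (b, a) :: rest =>
      applyLegacyGo
        (PySem.Str.join a (List.map String.ofList (PySem.Chars.splitOn s.toList b.toList)))
        rest

def apply_legacy_on_line_alt (line : String) : String :=
  applyLegacyGo line legacyPairsB

-- ===== PRECONDITION & SPEC =====
def Spec_apply_legacy_on_line (line : String) (out : String) : Prop := out = apply_legacy_on_line_alt line
instance (line : String) (out : String) : Decidable (Spec_apply_legacy_on_line line out) := by unfold Spec_apply_legacy_on_line; infer_instance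

-- ===== CLAIM (what is proved, stated in full; the proofs are below) =====
def Claim_equal_apply_legacy_on_line : Prop := ∀ (line : String), Dom_apply_legacy_on_line line → Spec_apply_legacy_on_line line (apply_legacy_on_line line)

-- ===== LEMMAS AND PROOFS =====

-- the pieces of l between successive leftmost occurrences of sep (sep ≠ [] where used)
def spPieces (sep : List Char) : List Char → List (List Char)
  | [] => [[]]
  | c :: t =>
      if h : sep ≠ [] ∧ sep.isPrefixOf (c :: t) then
        [] :: spPieces sep (List.drop sep.length (c :: t))
      else
        match spPieces sep t with
        | [] => [[c]]
        | p :: ps => (c :: p) :: ps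
termination_by l => l.length
decreasing_by
  · simp only [List.length_drop, List.length_cons]
    have : sep.length ≥ 1 := by
      cases sep with
      | nil => exact absurd rfl h.1
      | cons x xs => simp
    omega
  · simp

theorem spPieces_ne_nil (sep l : List Char) : spPieces sep l ≠ [] := by
  cases l with
  | nil => simp [spPieces]
  | cons c t =>
      rw [spPieces]
      split
      · simp
      · split <;> simp

theorem join_cons_head (n : List Char) (c : Char) (p : List Char) (ps : List (List Char)) :
    PySem.Chars.join n ((c :: p) :: ps) = c :: PySem.Chars.join n (p :: ps) := by
  cases ps with
  | nil => simp [PySem.Chars.join_singleton]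
  | cons q qs => simp [PySem.Chars.join_cons_cons]

theorem replace_go_eq (o n : List Char) (ho : o ≠ []) :
    ∀ (fuel : Nat) (l acc : List Char), l.length ≤ fuel →
      PySem.Chars.replace.go o n fuel l acc =
        acc.reverse ++ PySem.Chars.join n (spPieces o l) := by
  intro fuel
  induction fuel with
  | zero =>
      intro l acc hl
      have : l = [] := by cases l <;> simp_all
      subst this
      simp [PySem.Chars.replace.go, spPieces, PySem.Chars.join_singleton]
  | succ f ih =>
      intro l acc hl
      cases l with
      | nil => simp [PySem.Chars.replace.go, spPieces, PySem.Chars.join_singleton]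
      | cons c t =>
          rw [PySem.Chars.replace.go]
          by_cases hp : o.isPrefixOf (c :: t)
          · rw [if_pos hp]
            have hlen : o.length ≥ 1 := by cases o with | nil => exact absurd rfl ho | cons x xs => simp
            have hdrop : (List.drop o.length (c :: t)).length ≤ f := by
              simp only [List.length_drop, List.length_cons]
              simp only [List.length_cons] at hl
              omega
            rw [ih _ _ hdrop]
            rw [spPieces, dif_pos ⟨ho, hp⟩]
            obtain ⟨p, ps, hps⟩ : ∃ p ps, spPieces o (List.drop o.length (c :: t)) = p :: ps := by
              cases hsp : spPieces o (List.drop o.length (c :: t)) with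
              | nil => exact absurd hsp (spPieces_ne_nil _ _)
              | cons p ps => exact ⟨p, ps, rfl⟩
            rw [hps, PySem.Chars.join_cons_cons]
            simp
          · rw [if_neg hp]
            have ht : t.length ≤ f := by simp only [List.length_cons] at hl; omega
            rw [ih _ _ ht]
            rw [spPieces, dif_neg (by intro h; exact hp h.2)]
            obtain ⟨p, ps, hps⟩ : ∃ p ps, spPieces o t = p :: ps := by
              cases hsp : spPieces o t with
              | nil => exact absurd hsp (spPieces_ne_nil _ _)
              | cons p ps => exact ⟨p, ps, rfl⟩
            rw [hps, join_cons_head]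
            simp

theorem splitOn_go_eq (sep : List Char) (hs : sep ≠ []) :
    ∀ (fuel : Nat) (l cur : List Char) (acc : List (List Char)), l.length + 1 ≤ fuel →
      ∀ p ps, spPieces sep l = p :: ps →
      PySem.Chars.splitOn.go sep fuel l cur acc =
        acc.reverse ++ (cur.reverse ++ p) :: ps := by
  intro fuel
  induction fuel with
  | zero => intro l cur acc hl; omega
  | succ f ih =>
      intro l cur acc hl p ps hsp
      cases l with
      | nil =>
          simp only [spPieces] at hsp
          obtain ⟨hp, hps⟩ : p = [] ∧ ps = [] := by
            constructor <;> [exact (List.cons.injEq .. ▸ hsp).1.symm; exact (List.cons.injEq .. ▸ hsp).2.symm]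
          subst hp; subst hps
          simp [PySem.Chars.splitOn.go]
      | cons c t =>
          rw [PySem.Chars.splitOn.go]
          by_cases hp : sep.isPrefixOf (c :: t)
          · rw [if_pos hp]
            rw [spPieces, dif_pos ⟨hs, hp⟩] at hsp
            obtain ⟨q, qs, hq⟩ : ∃ q qs, spPieces sep (List.drop sep.length (c :: t)) = q :: qs := by
              cases h' : spPieces sep (List.drop sep.length (c :: t)) with
              | nil => exact absurd h' (spPieces_ne_nil _ _)
              | cons q qs => exact ⟨q, qs, rfl⟩
            rw [hq] at hsp
            have hlen : sep.length ≥ 1 := by cases sep with | nil => exact absurd rfl hs | cons x xs => simp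
            have hdrop : (List.drop sep.length (c :: t)).length + 1 ≤ f := by
              simp only [List.length_drop, List.length_cons]
              simp only [List.length_cons] at hl
              omega
            rw [ih _ _ _ hdrop q qs hq]
            have h1 : p = [] := (List.cons.injEq .. ▸ hsp).1.symm
            have h2 : ps = q :: qs := (List.cons.injEq .. ▸ hsp).2.symm
            subst h1; subst h2
            simp
          · rw [if_neg hp]
            rw [spPieces, dif_neg (by intro h; exact hp h.2)] at hsp
            obtain ⟨q, qs, hq⟩ : ∃ q qs, spPieces sep t = q :: qs := by
              cases h' : spPieces sep t with
              | nil => exact absurd h' (spPieces_ne_nil _ _)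
              | cons q qs => exact ⟨q, qs, rfl⟩
            rw [hq] at hsp
            have ht : t.length + 1 ≤ f := by simp only [List.length_cons] at hl; omega
            rw [ih _ _ _ ht q qs hq]
            have h1 : p = c :: q := (List.cons.injEq .. ▸ hsp).1.symm
            have h2 : ps = qs := (List.cons.injEq .. ▸ hsp).2.symm
            subst h1; subst h2
            simp

theorem replace_eq_join_splitOn (cs o n : List Char) (ho : o ≠ []) :
    PySem.Chars.replace cs o n = PySem.Chars.join n (PySem.Chars.splitOn cs o) := by
  obtain ⟨p, ps, hps⟩ : ∃ p ps, spPieces o cs = p :: ps := by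
    cases h' : spPieces o cs with
    | nil => exact absurd h' (spPieces_ne_nil _ _)
    | cons p ps => exact ⟨p, ps, rfl⟩
  rw [PySem.Chars.replace, if_neg (by simp [List.isEmpty_iff, ho])]
  rw [PySem.Chars.splitOn, splitOn_go_eq o ho (cs.length + 1) cs [] [] (by omega) p ps hps]
  rw [replace_go_eq o n ho cs.length cs [] (le_refl _)]
  simp [hps]

theorem str_replace_step (s b a : String) (hb : b.toList ≠ []) :
    PySem.Str.replace s b a =
      PySem.Str.join a (List.map String.ofList (PySem.Chars.splitOn s.toList b.toList)) := by
  apply String.toList_injective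
  rw [PySem.Str.toList_replace, PySem.Str.join]
  rw [replace_eq_join_splitOn _ _ _ hb]
  simp [List.map_map, Function.comp_def]


-- ===== VERDICT (by name: the statement is the Claim_ definition above) =====
theorem apply_legacy_on_line_spec : Claim_equal_apply_legacy_on_line := by
  intro line _
  unfold Spec_apply_legacy_on_line
  unfold apply_legacy_on_line apply_legacy_on_line_alt legacyItems legacyPairsB
  simp only [List.foldl, applyLegacyGo]
  rw [str_replace_step _ _ _ (by decide), str_replace_step _ _ _ (by decide),
      str_replace_step _ _ _ (by decide), str_replace_step _ _ _ (by decide),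
      str_replace_step _ _ _ (by decide)]
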